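-- pv_equiv track=rewrite | github.com/tims-adagene/ProteinMPNN-mod | design_antibody_top_cdr.py | highlight_changes
-- ===== SOURCE A (Python) =====
-- def highlight_changes(native_seq, designed_seq):
--     """
--     Add square brackets to highlight differences between native and designed sequences.
--
--     This function compares two sequences and adds brackets around regions that differ,
--     making it easy to visually identify which positions were changed during design.
--
--     Example:
--         Native seq:   AABBCC
--         Designed seq: AADDCC
--         Returns:      AA[BB]CC, AA[DD]CC
--
--     Args:
--         native_seq (str): Original sequence
--         designed_seq (str): Designed sequence
--
--     Returns:
--         tuple: (Annotated native sequence, Annotated designed sequence)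
--                Both sequences have brackets around differing regions
--     """
--     # Handle sequences of different lengths
--     if len(native_seq) != len(designed_seq):
--         return native_seq, designed_seq  # Skip processing if lengths differ
--
--     result_native = ""
--     result_designed = ""
--     in_diff = False  # Track whether we're currently in a differing region
--
--     # Compare sequences position by position
--     for i in range(len(native_seq)):
--         if native_seq[i] != designed_seq[i]:
--             # Start of a new differing region
--             if not in_diff:
--                 result_native += "["
--                 result_designed += "["
--                 in_diff = True
--             result_native += native_seq[i]
--             result_designed += designed_seq[i]
--         else:
--             # End of a differing region
--             if in_diff:
--                 result_native += "]"
--                 result_designed += "]"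
--                 in_diff = False
--             result_native += native_seq[i]
--             result_designed += designed_seq[i]
--
--     # Close brackets if sequence ends in a differing region
--     if in_diff:
--         result_native += "]"
--         result_designed += "]"
--
--     return result_native, result_designed
-- ===== SOURCE B (Python) =====
-- from itertools import groupby
--
--
-- def highlight_changes(native_seq, designed_seq):
--     if len(native_seq) != len(designed_seq):
--         return native_seq, designed_seq
--     parts_native = []
--     parts_designed = []
--     for diff, grp in groupby(zip(native_seq, designed_seq), key=lambda p: p[0] != p[1]):
--         grp = list(grp)
--         ns = ''.join(p[0] for p in grp)
--         ds = ''.join(p[1] for p in grp)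
--         if diff:
--             parts_native.append('[' + ns + ']')
--             parts_designed.append('[' + ds + ']')
--         else:
--             parts_native.append(ns)
--             parts_designed.append(ds)
--     return ''.join(parts_native), ''.join(parts_designed)
-- ===== Notes on version B (the rewrite author's own statement) =====
-- stated objective: idiomatic
-- what changed: Replaces the stateful per-character flag loop with an itertools.groupby pass that splits the zipped sequences into maximal matching/differing runs and brackets the differing runs.
import Mathlib
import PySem

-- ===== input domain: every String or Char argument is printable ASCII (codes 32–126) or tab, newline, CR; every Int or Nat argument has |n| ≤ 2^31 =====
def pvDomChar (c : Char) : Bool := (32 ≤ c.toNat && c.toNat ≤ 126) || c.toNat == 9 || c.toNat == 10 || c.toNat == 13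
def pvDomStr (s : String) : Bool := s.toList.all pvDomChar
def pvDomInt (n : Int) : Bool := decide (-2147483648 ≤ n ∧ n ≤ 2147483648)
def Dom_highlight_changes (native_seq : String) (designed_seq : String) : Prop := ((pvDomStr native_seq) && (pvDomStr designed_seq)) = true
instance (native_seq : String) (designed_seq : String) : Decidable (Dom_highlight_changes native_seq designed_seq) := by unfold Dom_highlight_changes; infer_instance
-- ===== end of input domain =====

-- B replaces A's stateful per-character bracket flag by a group-into-maximal-runs pass
-- (itertools.groupby on the zipped sequences) that brackets the differing runs; same output, same cost.


-- ===== PORT A =====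
-- A's loop step: state (result_native, result_designed, in_diff); i-th characters a, c.
def hcStepA (st : List Char × List Char × Bool) (a : Char) (c : Char) : List Char × List Char × Bool :=
  if a ≠ c then
    let st' := if st.2.2 = false then (st.1 ++ ['['], st.2.1 ++ ['['], true) else st
    (st'.1 ++ [a], st'.2.1 ++ [c], st'.2.2)
  else
    let st' := if st.2.2 = true then (st.1 ++ [']'], st.2.1 ++ [']'], false) else st
    (st'.1 ++ [a], st'.2.1 ++ [c], st'.2.2)

def highlight_changes (native_seq : String) (designed_seq : String) : String × String :=
  if native_seq.toList.length ≠ designed_seq.toList.length then (native_seq, designed_seq)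
  else
    let n := native_seq.toList
    let d := designed_seq.toList
    -- for i in range(len(native_seq)): … ; indices are always in range, so s[i] is pyGet? with a dummy default
    let r := (PySem.List.pyRange 0 (n.length : Int)).foldl
      (fun st i => hcStepA st ((PySem.List.pyGet? n i).getD ' ') ((PySem.List.pyGet? d i).getD ' ')) ([], [], false)
    let r := if r.2.2 then (r.1 ++ [']'], r.2.1 ++ [']'], false) else r
    (String.ofList r.1, String.ofList r.2.1)

-- ===== PORT B =====
-- groupby(zip(n, d), key = p[0] != p[1]): maximal runs tagged with their key
def hcRuns : List (Char × Char) → List (Bool × List (Char × Char))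
  | [] => []
  | p :: t =>
    let k := p.1 != p.2
    (k, p :: t.takeWhile (fun q => (q.1 != q.2) == k)) :: hcRuns (t.dropWhile (fun q => (q.1 != q.2) == k))
termination_by xs => xs.length
decreasing_by simpa using Nat.lt_succ_of_le (List.length_dropWhile_le _ _)

-- one group → its (native piece, designed piece), bracketed iff a differing run
def hcPiece (g : Bool × List (Char × Char)) : List Char × List Char :=
  if g.1 then ('[' :: g.2.map (·.1) ++ [']'], '[' :: g.2.map (·.2) ++ [']'])
  else (g.2.map (·.1), g.2.map (·.2))

def highlight_changes_alt (native_seq : String) (designed_seq : String) : String × String :=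
  if native_seq.toList.length ≠ designed_seq.toList.length then (native_seq, designed_seq)
  else
    let pieces := (hcRuns (native_seq.toList.zip designed_seq.toList)).map hcPiece
    (String.ofList (pieces.map (·.1)).flatten, String.ofList (pieces.map (·.2)).flatten)

-- ===== PRECONDITION & SPEC =====
def Spec_highlight_changes (native_seq : String) (designed_seq : String) (out : String × String) : Prop := out = highlight_changes_alt native_seq designed_seq
instance (native_seq : String) (designed_seq : String) (out : String × String) : Decidable (Spec_highlight_changes native_seq designed_seq out) := by unfold Spec_highlight_changes; infer_instance

-- ===== CLAIM (what is proved, stated in full; the proofs are below) =====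
def Claim_equal_highlight_changes : Prop := ∀ (native_seq : String) (designed_seq : String), Dom_highlight_changes native_seq designed_seq → Spec_highlight_changes native_seq designed_seq (highlight_changes native_seq designed_seq)

-- ===== LEMMAS AND PROOFS =====

-- B's output on a zipped pair list
def hcEmit (ps : List (Char × Char)) : List Char × List Char :=
  ((((hcRuns ps).map hcPiece).map (·.1)).flatten, (((hcRuns ps).map hcPiece).map (·.2)).flatten)

-- A's closing step
def hcFinish (st : List Char × List Char × Bool) : List Char × List Char :=
  if st.2.2 then (st.1 ++ [']'], st.2.1 ++ [']']) else (st.1, st.2.1)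

-- indexing loop = fold over the zip
lemma hc_idx_zip (n d : List Char) (h : n.length = d.length) :
    ∀ st : List Char × List Char × Bool,
    (List.range n.length).foldl
      (fun st i => hcStepA st (n.getD i ' ') (d.getD i ' ')) st
    = (n.zip d).foldl (fun st p => hcStepA st p.1 p.2) st := by
  induction n generalizing d with
  | nil => intro st; simp
  | cons a n ih =>
    intro st
    cases d with
    | nil => simp at h
    | cons c d =>
      simp only [List.length_cons, List.range_succ_eq_map, List.foldl_cons, List.foldl_map,
        List.getD_cons_zero, List.getD_cons_succ, List.zip_cons_cons]
      exact ih d (by simpa using h) _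

-- a run of matching pairs, flag false: characters are appended, flag stays false
lemma hc_eq_run (g : List (Char × Char)) (hg : ∀ q ∈ g, q.1 = q.2) :
    ∀ aN aD : List Char,
    g.foldl (fun st p => hcStepA st p.1 p.2) (aN, aD, false)
    = (aN ++ g.map (·.1), aD ++ g.map (·.2), false) := by
  induction g with
  | nil => intro aN aD; simp
  | cons p t ih =>
    intro aN aD
    have hp : p.1 = p.2 := hg p (by simp)
    have hstep : hcStepA (aN, aD, false) p.1 p.2 = (aN ++ [p.1], aD ++ [p.2], false) := by
      simp [hcStepA, hp]
    rw [List.foldl_cons, hstep, ih (fun q hq => hg q (by simp [hq]))]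
    simp

-- a run of differing pairs, flag true: characters are appended, flag stays true
lemma hc_diff_run (g : List (Char × Char)) (hg : ∀ q ∈ g, q.1 ≠ q.2) :
    ∀ aN aD : List Char,
    g.foldl (fun st p => hcStepA st p.1 p.2) (aN, aD, true)
    = (aN ++ g.map (·.1), aD ++ g.map (·.2), true) := by
  induction g with
  | nil => intro aN aD; simp
  | cons p t ih =>
    intro aN aD
    have hp : p.1 ≠ p.2 := hg p (by simp)
    have hstep : hcStepA (aN, aD, true) p.1 p.2 = (aN ++ [p.1], aD ++ [p.2], true) := by
      simp [hcStepA, hp]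
    rw [List.foldl_cons, hstep, ih (fun q hq => hg q (by simp [hq]))]
    simp

-- main invariant: from flag false, A's fold + closing = accumulators ++ B's emission
lemma hc_main : ∀ (N : Nat) (ps : List (Char × Char)), ps.length ≤ N →
    ∀ aN aD : List Char,
    hcFinish (ps.foldl (fun st p => hcStepA st p.1 p.2) (aN, aD, false))
    = (aN ++ (hcEmit ps).1, aD ++ (hcEmit ps).2) := by
  intro N
  induction N with
  | zero =>
    intro ps hps aN aD
    have : ps = [] := List.eq_nil_of_length_eq_zero (Nat.le_zero.mp hps)
    subst this; simp [hcEmit, hcRuns, hcFinish]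
  | succ N ih =>
    intro ps hps aN aD
    cases ps with
    | nil => simp [hcEmit, hcRuns, hcFinish]
    | cons p t =>
      by_cases hp : p.1 = p.2
      · -- matching run
        have hk : (p.1 != p.2) = false := by simp [hp]
        have hrun : hcRuns (p :: t)
            = (false, p :: t.takeWhile (fun q => (q.1 != q.2) == false))
              :: hcRuns (t.dropWhile (fun q => (q.1 != q.2) == false)) := by
          rw [hcRuns]; simp [hk]
        have hsplit : p :: t
            = (p :: t.takeWhile (fun q => (q.1 != q.2) == false))
              ++ t.dropWhile (fun q => (q.1 != q.2) == false) := by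
          simp [List.takeWhile_append_dropWhile]
        have hgall : ∀ q ∈ p :: t.takeWhile (fun q => (q.1 != q.2) == false), q.1 = q.2 := by
          intro q hq
          rcases List.mem_cons.mp hq with rfl | hq
          · exact hp
          · simpa using List.mem_takeWhile_imp hq
        have hlen : (t.dropWhile (fun q => (q.1 != q.2) == false)).length ≤ N := by
          have := List.length_dropWhile_le (fun q => (q.1 != q.2) == false) t
          simp only [List.length_cons] at hps; omega
        have hemit : hcEmit (p :: t)
            = ((p :: t.takeWhile (fun q => (q.1 != q.2) == false)).map (·.1)
                ++ (hcEmit (t.dropWhile (fun q => (q.1 != q.2) == false))).1,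
               (p :: t.takeWhile (fun q => (q.1 != q.2) == false)).map (·.2)
                ++ (hcEmit (t.dropWhile (fun q => (q.1 != q.2) == false))).2) := by
          simp [hcEmit, hrun, hcPiece]
        rw [hemit]
        conv_lhs => rw [hsplit]
        rw [List.foldl_append, hc_eq_run _ hgall aN aD, ih _ hlen]
        simp
      · -- differing run
        have hk : (p.1 != p.2) = true := by simp [hp]
        have hrun : hcRuns (p :: t)
            = (true, p :: t.takeWhile (fun q => (q.1 != q.2) == true))
              :: hcRuns (t.dropWhile (fun q => (q.1 != q.2) == true)) := by
          rw [hcRuns]; simp [hk]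
        have hsplit : p :: t
            = (p :: t.takeWhile (fun q => (q.1 != q.2) == true))
              ++ t.dropWhile (fun q => (q.1 != q.2) == true) := by
          simp [List.takeWhile_append_dropWhile]
        have hgall : ∀ q ∈ t.takeWhile (fun q => (q.1 != q.2) == true), q.1 ≠ q.2 := by
          intro q hq
          simpa using List.mem_takeWhile_imp hq
        have hlen : (t.dropWhile (fun q => (q.1 != q.2) == true)).length ≤ N := by
          have := List.length_dropWhile_le (fun q => (q.1 != q.2) == true) t
          simp only [List.length_cons] at hps; omega
        have hemit : hcEmit (p :: t)
            = ('[' :: (p :: t.takeWhile (fun q => (q.1 != q.2) == true)).map (·.1) ++ [']']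
                ++ (hcEmit (t.dropWhile (fun q => (q.1 != q.2) == true))).1,
               '[' :: (p :: t.takeWhile (fun q => (q.1 != q.2) == true)).map (·.2) ++ [']']
                ++ (hcEmit (t.dropWhile (fun q => (q.1 != q.2) == true))).2) := by
          simp [hcEmit, hrun, hcPiece]
        have hstep1 : hcStepA (aN, aD, false) p.1 p.2
            = (aN ++ ['['] ++ [p.1], aD ++ ['['] ++ [p.2], true) := by
          simp [hcStepA, hp]
        have hfold : (p :: t).foldl (fun st p => hcStepA st p.1 p.2) (aN, aD, false)
            = (t.dropWhile (fun q => (q.1 != q.2) == true)).foldl (fun st p => hcStepA st p.1 p.2)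
                (aN ++ '[' :: (p :: t.takeWhile (fun q => (q.1 != q.2) == true)).map (·.1),
                 aD ++ '[' :: (p :: t.takeWhile (fun q => (q.1 != q.2) == true)).map (·.2), true) := by
          conv_lhs => rw [hsplit]
          rw [List.foldl_append, List.foldl_cons, hstep1, hc_diff_run _ hgall]
          simp
        rw [hfold, hemit]
        cases hrest : t.dropWhile (fun q => (q.1 != q.2) == true) with
        | nil => simp [hcFinish, hcEmit, hcRuns]
        | cons r t' =>
          have hr : r.1 = r.2 := by
            have hhead := List.head?_dropWhile_not (fun q => (q.1 != q.2) == true) t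
            rw [hrest] at hhead
            simpa using hhead
          have hclose : hcStepA
              (aN ++ '[' :: (p :: t.takeWhile (fun q => (q.1 != q.2) == true)).map (·.1),
               aD ++ '[' :: (p :: t.takeWhile (fun q => (q.1 != q.2) == true)).map (·.2), true) r.1 r.2
              = hcStepA
              (aN ++ '[' :: (p :: t.takeWhile (fun q => (q.1 != q.2) == true)).map (·.1) ++ [']'],
               aD ++ '[' :: (p :: t.takeWhile (fun q => (q.1 != q.2) == true)).map (·.2) ++ [']'], false) r.1 r.2 := by
            simp [hcStepA, hr]
          rw [List.foldl_cons, hclose, ← List.foldl_cons, ← hrest,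
            ih _ hlen]
          rw [hrest]
          simp

theorem highlight_changes_spec : Claim_equal_highlight_changes := by
  intro ns ds _
  unfold Spec_highlight_changes highlight_changes highlight_changes_alt
  by_cases h : ns.toList.length = ds.toList.length
  · rw [if_neg (not_ne_iff.mpr h), if_neg (not_ne_iff.mpr h)]
    dsimp only
    rw [PySem.List.pyRange_zero_natCast, List.foldl_map]
    have hfold :
        (List.range ns.toList.length).foldl
          (fun st (k : Nat) => hcStepA st ((PySem.List.pyGet? ns.toList (k : Int)).getD ' ')
            ((PySem.List.pyGet? ds.toList (k : Int)).getD ' ')) (([], [], false) : List Char × List Char × Bool)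
        = (List.range ns.toList.length).foldl
          (fun st k => hcStepA st (ns.toList.getD k ' ') (ds.toList.getD k ' ')) ([], [], false) := by
      simp [PySem.List.pyGet?_natCast, List.getD_eq_getElem?_getD]
    rw [hfold, hc_idx_zip ns.toList ds.toList h]
    have hmain := hc_main (ns.toList.zip ds.toList).length (ns.toList.zip ds.toList) le_rfl [] []
    simp only [List.nil_append] at hmain
    have h1 : ∀ r : List Char × List Char × Bool,
        (if r.2.2 then (r.1 ++ [']'], r.2.1 ++ [']'], false) else r).1 = (hcFinish r).1 := by
      intro r; cases hb : r.2.2 <;> simp [hcFinish, hb]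
    have h2 : ∀ r : List Char × List Char × Bool,
        (if r.2.2 then (r.1 ++ [']'], r.2.1 ++ [']'], false) else r).2.1 = (hcFinish r).2 := by
      intro r; cases hb : r.2.2 <;> simp [hcFinish, hb]
    rw [h1, h2, hmain]
    simp [hcEmit]
  · rw [if_pos h, if_pos h]
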